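-- pv_equiv track=rewrite | github.com/912-Daraban-Tudor/bank-account-manager | functions.py | filter_type
-- ===== SOURCE A (Python) =====
-- def get_type(account):
--     return account[2]
--
-- def filter_type(account, type):
--     """
--     this function deletes all the transactions of a different type than the given one
--     :param account: list of transactions
--     :param type: given type
--     :return: processed list of transations
--     """
--     try:
--         i = 0
--         while i < len(account):
--             if get_type(account[i]) != type:
--                 account.pop(i)
--                 i -= 1
--             i += 1
--         return account
--     except:
--         raise ValueError
-- ===== SOURCE B (Python) =====
-- def filter_type(account, type):
--     """Build the filtered list in one pass (list comprehension) instead of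
--     repeatedly pop()-ing in place. Equivalence is about the return value
--     only: A mutates `account` in place, B does not."""
--     return [t for t in account if t[2] == type]
-- ===== Notes on version B (the rewrite author's own statement) =====
-- stated objective: idiomatic
-- what changed: Replaces the destructive while-loop that pops non-matching elements in place (rescanning indices after each pop) with a single-pass list comprehension building a new list; return-value equivalence only, since A mutates the list in place and B does not.
import Mathlib
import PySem

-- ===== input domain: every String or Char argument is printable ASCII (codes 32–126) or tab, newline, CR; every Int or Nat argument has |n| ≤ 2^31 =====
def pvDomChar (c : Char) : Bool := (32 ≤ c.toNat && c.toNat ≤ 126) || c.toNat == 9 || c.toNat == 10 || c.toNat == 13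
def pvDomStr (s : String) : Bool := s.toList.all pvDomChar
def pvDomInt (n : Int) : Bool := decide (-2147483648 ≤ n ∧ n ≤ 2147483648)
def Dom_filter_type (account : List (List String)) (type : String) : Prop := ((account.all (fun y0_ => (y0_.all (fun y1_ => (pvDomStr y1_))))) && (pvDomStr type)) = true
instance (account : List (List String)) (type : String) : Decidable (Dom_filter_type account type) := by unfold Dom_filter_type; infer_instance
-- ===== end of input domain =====

-- B replaces A's destructive pop-and-rewind while-loop by an idiomatic single-pass list
-- comprehension; return-value equivalence only: A mutates `account` in place, B builds a new list.

-- ===== PORT A =====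
-- get_type(account): return account[2]
def get_type_port (t : List String) : Option String := PySem.List.pyGet? t (2 : Int)

-- the while loop of A; `none` = an exception occurred (caught and re-raised as ValueError)
def filterTypeLoop (account : List (List String)) (type : String) (i : Nat) : Option (List (List String)) :=
  if _h : i < account.length then
    match PySem.List.pyGet? account (i : Int) with
    | none => none
    | some t =>
      match get_type_port t with
      | none => none          -- IndexError in get_type → except → ValueError
      | some ty =>
        if ty ≠ type then
          match hp : PySem.List.pop? account (i : Int) with
          | none => none
          | some r => filterTypeLoop r.2 type i   -- account.pop(i); i -= 1; i += 1  (net: i unchanged)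
        else filterTypeLoop account type (i + 1)  -- i += 1
  else some account
termination_by 2 * account.length - i
decreasing_by
  all_goals first
    | (have := PySem.List.length_of_pop?_eq_some _ hp; omega)
    | omega

-- Python's `i` is an int that provably never becomes negative (it only decreases right
-- before the unconditional increment), so a Nat index is a faithful transcription.
-- The `.getD account` arm is unreachable under Pre_filter_type (A raises ValueError there).
def filter_type (account : List (List String)) (type : String) : List (List String) :=
  (filterTypeLoop account type 0).getD account

-- ===== PORT B =====
-- [t for t in account if t[2] == type]
def filter_type_alt (account : List (List String)) (type : String) : List (List String) :=
  account.filter (fun t => PySem.List.pyGet? t (2 : Int) == some type)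

-- ===== PRECONDITION & SPEC =====
-- Pre_ excludes exactly the inputs on which A raises ValueError: some transaction has
-- fewer than 3 fields (get_type's account[2] raises IndexError, caught → ValueError).
def Pre_filter_type (account : List (List String)) (type : String) : Prop :=
  ∀ t ∈ account, 3 ≤ t.length
instance (account : List (List String)) (type : String) : Decidable (Pre_filter_type account type) := by unfold Pre_filter_type; infer_instance

def pvWitness_filter_type : List (List String) × String :=
  ([["1", "100", "in"], ["2", "50", "out"], ["3", "7", "in"]], "in")

def Spec_filter_type (account : List (List String)) (type : String) (out : List (List String)) : Prop := out = filter_type_alt account type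
instance (account : List (List String)) (type : String) (out : List (List String)) : Decidable (Spec_filter_type account type out) := by unfold Spec_filter_type; infer_instance

-- ===== CLAIM (what is proved, stated in full; the proofs are below) =====
def Claim_equal_filter_type : Prop := ∀ (account : List (List String)) (type : String), Dom_filter_type account type → Pre_filter_type account type → Spec_filter_type account type (filter_type account type)

-- ===== LEMMAS AND PROOFS =====

-- loop invariant: `done` is the already-kept prefix (all of the given type), `todo` the
-- unprocessed suffix; the loop at index done.length returns done ++ filter todo.
lemma filterTypeLoop_eq (type : String) (todo : List (List String)) :
    ∀ done : List (List String),
    (∀ t ∈ todo, 3 ≤ t.length) →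
    filterTypeLoop (done ++ todo) type done.length
      = some (done ++ todo.filter (fun t => PySem.List.pyGet? t (2 : Int) == some type)) := by
  induction todo with
  | nil =>
    intro done _
    rw [filterTypeLoop]
    simp
  | cons t rest ih =>
    intro done hlen
    have ht : 3 ≤ t.length := hlen t (by simp)
    have hi : done.length < (done ++ t :: rest).length := by simp
    rw [filterTypeLoop]
    rw [dif_pos hi]
    have hget : PySem.List.pyGet? (done ++ t :: rest) ((done.length : Nat) : Int) = some t := by
      simp
    have hty : get_type_port t = some (t[2]'(by omega)) := by
      have h2 : ((2 : Nat) : Int) = (2 : Int) := by norm_num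
      rw [get_type_port, ← h2, PySem.List.pyGet?_ofNat t 2 (by omega)]
    simp only [hget, hty]
    have hpy : PySem.List.pyGet? t (2 : Int) = some (t[2]'(by omega)) := by
      simpa [get_type_port] using hty
    by_cases hcase : t[2]'(by omega) = type
    · rw [if_neg (not_not_intro hcase)]
      have : done.length + 1 = (done ++ [t]).length := by simp
      have step := ih (done ++ [t]) (fun u hu => hlen u (by simp [hu]))
      simp only [List.append_assoc, List.singleton_append] at step
      rw [this, step]
      simp [hpy, hcase]
    · rw [if_pos hcase]
      have hpop : PySem.List.pop? (done ++ t :: rest) ((done.length : Nat) : Int)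
          = some ((done ++ t :: rest)[done.length]'hi, (done ++ t :: rest).eraseIdx done.length) :=
        PySem.List.pop?_natCast (done ++ t :: rest) done.length hi
      have herase : ∀ d : List (List String), (d ++ t :: rest).eraseIdx d.length = d ++ rest := by
        intro d
        induction d with
        | nil => simp
        | cons a d ihd => simpa using ihd
      split
      · next heq => rw [hpop] at heq; cases heq
      · next r heq =>
        rw [hpop] at heq
        injection heq with heq'
        subst heq'
        rw [herase done, ih done (fun u hu => hlen u (by simp [hu]))]
        simp [hpy, hcase]

-- ===== VERDICT (by name: the statement is the Claim_ definition above) =====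
theorem filter_type_spec : Claim_equal_filter_type := by
  intro account type _hdom hpre
  unfold Spec_filter_type filter_type filter_type_alt
  have := filterTypeLoop_eq type account [] hpre
  simpa using congrArg (fun o => o.getD account) this
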